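-- pv_equiv track=rewrite | github.com/Daarkie/triple-qr-code-gen | triple-qr-code-gen/qr-gen.py | rule1_penalty
-- ===== SOURCE A (Python) =====
-- def rule1_penalty(masked, size):
--     penalty = 0
--     # Horizontal check
--     for row in range(4, size - 4):
--         run = 0
--         current = masked[row][4]
--         for col in range(4, size - 4):
--             if masked[row][col] == current:
--                 run += 1
--             else:
--                 current = masked[row][col]
--                 run = 1
--             if run == 5 and current < 2:
--                 penalty += 3
--             elif run > 5 and current < 2:
--                 penalty += 1
--
--     # Vertical check
--     for col in range(4, size - 4):
--         run = 0
--         current = masked[0][col]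
--         for row in range(4, size - 4):
--             if masked[row][col] == current:
--                 run += 1
--             else:
--                 current = masked[row][col]
--                 run = 1
--             if run == 5 and current < 2:
--                 penalty += 3
--             elif run > 5 and current < 2:
--                 penalty += 1
--
--     return penalty
-- ===== SOURCE B (Python) =====
-- def _window_score(line):
--     # Stateless sliding-window scoring: every uniform dark/light window of 5
--     # contributes 1, plus 2 more when the window starts a maximal run
--     # (3 + (L-5)*1 = L-2 per qualifying run).
--     n = len(line)
--     total = 0
--     for i in range(n - 4):
--         w = line[i:i + 5]
--         if w[0] < 2 and w.count(w[0]) == 5: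
--             total += 3 if i == 0 or line[i - 1] != line[i] else 1
--     return total
--
--
-- def rule1_penalty(masked, size):
--     lo, hi = 4, size - 4
--     if hi <= lo:
--         return 0
--     region = [row[lo:hi] for row in masked[lo:hi]]
--     total = 0
--     for line in region:
--         total += _window_score(line)
--     for j in range(hi - lo):
--         total += _window_score([row[j] for row in region])
--     return total
-- ===== Notes on version B (the rewrite author's own statement) =====
-- stated objective: alternative
-- what changed: B replaces A's stateful run-length counter (run/current state with run==5/run>5 branches) by a stateless sliding-window score: each length-5 window of the line is judged independently (uniform and dark/light scores 3 when it starts a maximal run, else 1), applied to the sliced region's rows and to its columns built by index.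
import Mathlib
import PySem

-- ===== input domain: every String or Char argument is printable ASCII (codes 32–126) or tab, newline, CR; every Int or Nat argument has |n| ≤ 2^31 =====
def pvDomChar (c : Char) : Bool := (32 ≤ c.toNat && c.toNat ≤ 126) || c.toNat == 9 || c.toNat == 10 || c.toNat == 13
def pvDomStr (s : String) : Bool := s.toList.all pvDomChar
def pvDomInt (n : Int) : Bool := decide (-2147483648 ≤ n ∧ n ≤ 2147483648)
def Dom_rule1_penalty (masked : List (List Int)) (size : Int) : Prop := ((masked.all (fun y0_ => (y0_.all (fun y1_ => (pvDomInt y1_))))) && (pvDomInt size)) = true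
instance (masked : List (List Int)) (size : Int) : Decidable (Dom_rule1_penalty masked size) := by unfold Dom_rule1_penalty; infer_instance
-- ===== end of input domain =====

-- B replaces A's stateful run-length counter by a stateless sliding-window score over the
-- sliced region's rows and index-built columns (objective: alternative algorithm, same cost).


-- ===== PORT A =====
-- the loop body shared by A's horizontal and vertical passes: state = (penalty, run, current)
def pvStep (s : Int × Int × Int) (v : Int) : Int × Int × Int :=
  let run := if v = s.2.2 then s.2.1 + 1 else 1
  let cur := if v = s.2.2 then s.2.2 else v
  let pen := if run = 5 ∧ cur < 2 then s.1 + 3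
             else if run > 5 ∧ cur < 2 then s.1 + 1 else s.1
  (pen, run, cur)

def rule1_penalty (masked : List (List Int)) (size : Int) : Int :=
  let rng := PySem.List.pyRange 4 (size - 4) 1
  let p1 := rng.foldl (fun pen row =>
    (rng.foldl
        (fun s col => pvStep s (PySem.List.pyGetD (PySem.List.pyGetD masked row []) col 0))
        (pen, 0, PySem.List.pyGetD (PySem.List.pyGetD masked row []) 4 0)).1) 0
  rng.foldl (fun pen col =>
    (rng.foldl
        (fun s row => pvStep s (PySem.List.pyGetD (PySem.List.pyGetD masked row []) col 0))
        (pen, 0, PySem.List.pyGetD (PySem.List.pyGetD masked 0 []) col 0)).1) p1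

-- ===== PORT B =====
-- _window_score: every length-5 window is judged on its own (no run/current state):
-- w = line[i:i+5]; uniform dark/light window scores 3 at a run start, else 1
def pvWindowScore (line : List Int) : Int :=
  (PySem.List.pyRange 0 ((line.length : Int) - 4) 1).foldl (fun tot i =>
    let w := PySem.List.slice line (some i) (some (i + 5))
    let w0 := PySem.List.pyGetD w 0 0
    if w0 < 2 ∧ PySem.List.count w w0 = 5 then
      tot + (if i = 0 ∨ PySem.List.pyGetD line (i - 1) 0 ≠ PySem.List.pyGetD line i 0 then 3 else 1)
    else tot) 0

def rule1_penalty_alt (masked : List (List Int)) (size : Int) : Int :=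
  if size - 4 ≤ 4 then 0
  else
    let region := (PySem.List.slice masked (some 4) (some (size - 4))).map
        (fun r => PySem.List.slice r (some 4) (some (size - 4)))
    let t1 := region.foldl (fun tot line => tot + pvWindowScore line) 0
    (PySem.List.pyRange 0 (size - 4 - 4) 1).foldl
      (fun tot j => tot + pvWindowScore (region.map (fun row => PySem.List.pyGetD row j 0))) t1

-- ===== PRECONDITION & SPEC =====
-- Pre_ excludes exactly the inputs on which A raises IndexError: for size ≥ 9 A indexes
-- masked[4..size-5], each such row at columns 4..size-5, and masked[0] at those columns.
def Pre_rule1_penalty (masked : List (List Int)) (size : Int) : Prop :=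
  9 ≤ size →
    (size - 4 ≤ (masked.length : Int) ∧
     (∀ r ∈ PySem.List.slice masked (some 4) (some (size - 4)), size - 4 ≤ (r.length : Int)) ∧
     size - 4 ≤ ((masked.headD []).length : Int))
instance (masked : List (List Int)) (size : Int) : Decidable (Pre_rule1_penalty masked size) := by
  unfold Pre_rule1_penalty; infer_instance

def pvWitness_rule1_penalty : List (List Int) × Int :=
  ([[0,0,0,0,0], [0,1,0,1,0], [2,2,2,2,2], [1,1,1,1,1], [0,0,0,0,0]], 9)

def Spec_rule1_penalty (masked : List (List Int)) (size : Int) (out : Int) : Prop :=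
  out = rule1_penalty_alt masked size
instance (masked : List (List Int)) (size : Int) (out : Int) : Decidable (Spec_rule1_penalty masked size out) := by
  unfold Spec_rule1_penalty; infer_instance

-- ===== CLAIM (what is proved, stated in full; the proofs are below) =====
def Claim_equal_rule1_penalty : Prop := ∀ (masked : List (List Int)) (size : Int), Dom_rule1_penalty masked size → Pre_rule1_penalty masked size → Spec_rule1_penalty masked size (rule1_penalty masked size)

-- ===== LEMMAS AND PROOFS =====

-- run-length decomposition of a line (proof-side characterisation both programs are related to)
def pvRunsFrom (cur run : Int) : List Int → List (Int × Int)
  | [] => [(cur, run)]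
  | v :: t => if v = cur then pvRunsFrom cur (run + 1) t else (cur, run) :: pvRunsFrom v 1 t

def pvGroups : List Int → List (Int × Int)
  | [] => []
  | v :: t => pvRunsFrom v 1 t

-- per-run penalty: value < 2 and length ≥ 5 contribute length - 2
def pvGp (p : Int × Int) : Int := if p.1 < 2 ∧ 5 ≤ p.2 then p.2 - 2 else 0

def pvLine (l : List Int) : Int := ((pvGroups l).map pvGp).sum

-- B's per-window score, restated over Nat indices and take/drop windows
def pvWsN (l : List Int) (i : Nat) : Int :=
  let w := (l.drop i).take 5
  if w.getD 0 0 < 2 ∧ w.count (w.getD 0 0) = 5 then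
    if i = 0 ∨ l.getD (i-1) 0 ≠ l.getD i 0 then 3 else 1
  else 0

def pvWS (l : List Int) : Int := ((List.range (l.length - 4)).map (pvWsN l)).sum

-- A's scan of a tail, starting mid-run (cur, run), scores the run-length groups
lemma scan_runs (l : List Int) : ∀ (pen run cur : Int),
    (l.foldl pvStep (pen, run, cur)).1
      = pen + ((pvRunsFrom cur run l).map pvGp).sum - pvGp (cur, run) := by
  induction l with
  | nil => intro pen run cur; simp [pvRunsFrom]
  | cons v t ih =>
    intro pen run cur
    by_cases h : v = cur
    · subst h
      simp only [List.foldl_cons, pvStep, pvRunsFrom]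
      rw [ih]
      simp only [pvGp]
      split_ifs <;> omega
    · simp only [List.foldl_cons, pvStep, if_neg h, pvRunsFrom, List.map_cons, List.sum_cons]
      rw [ih]
      simp only [pvGp]
      split_ifs <;> omega

-- A's scan of a whole line from run = 0 (any seed current) is the groups penalty
lemma scan_line (l : List Int) (pen c0 : Int) :
    (l.foldl pvStep (pen, 0, c0)).1 = pen + pvLine l := by
  cases l with
  | nil => simp [pvLine, pvGroups]
  | cons v t =>
    have hstate : pvStep (pen, 0, c0) v = (pen, 1, v) := by
      by_cases h : v = c0
      · subst h; simp [pvStep]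
      · simp [pvStep, h]
    rw [List.foldl_cons, hstate, scan_runs]
    simp [pvLine, pvGroups, pvGp]

-- ---- B's window sum equals the groups penalty ----

lemma head?_dropWhile_false {α : Type} (p : α → Bool) (l : List α) (x : α)
    (h : (l.dropWhile p).head? = some x) : p x = false := by
  induction l with
  | nil => simp [List.dropWhile] at h
  | cons a s ih =>
    rw [List.dropWhile_cons] at h
    split at h
    · exact ih h
    · simp_all

lemma getD_rappend_left (k : Nat) (v : Int) (rest : List Int) (j : Nat) (d : Int) (h : j < k) :
    (List.replicate k v ++ rest).getD j d = v := by
  rw [List.getD_eq_getElem?_getD,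
      List.getElem?_append_left (by simpa using h : j < (List.replicate k v).length)]
  simp [h]

lemma getD_rappend_right (k : Nat) (v : Int) (rest : List Int) (j : Nat) (d : Int) :
    (List.replicate k v ++ rest).getD (k + j) d = rest.getD j d := by
  rw [List.getD_eq_getElem?_getD, List.getD_eq_getElem?_getD,
      show k + j = (List.replicate k v).length + j by simp,
      List.getElem?_append_right (by simp)]
  simp

-- pointwise value of B's window score on a leading run followed by a differing rest
lemma pvWsN_rappend (k : Nat) (v : Int) (rest : List Int) (hk : 1 ≤ k)
    (hh : ∀ h ∈ rest.head?, h ≠ v) (i : Nat) (hi : i < k + rest.length - 4) :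
    pvWsN (List.replicate k v ++ rest) i =
      if i + 4 < k then (if v < 2 then (if i = 0 then 3 else 1) else 0)
      else if k ≤ i then pvWsN rest (i - k) else 0 := by
  have hlen5 : 5 ≤ ((List.replicate k v ++ rest).drop i).length := by
    simp [List.length_drop]
    omega
  by_cases hA : i + 4 < k
  · -- window fully inside the run
    have hdrop : (List.replicate k v ++ rest).drop i = List.replicate (k - i) v ++ rest := by
      rw [List.drop_append_of_le_length (by simp; omega), List.drop_replicate]
    have htake : (List.replicate (k - i) v ++ rest).take 5 = List.replicate 5 v := by
      rw [List.take_append_of_le_length (by simp; omega), List.take_replicate]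
      congr 1
      omega
    have hw0 : (List.replicate 5 v).getD 0 0 = v := by simp
    have hprev : i ≠ 0 → (List.replicate k v ++ rest).getD (i - 1) 0 = v :=
      fun _ => getD_rappend_left k v rest (i-1) 0 (by omega)
    have hcur : (List.replicate k v ++ rest).getD i 0 = v :=
      getD_rappend_left k v rest i 0 (by omega)
    simp only [pvWsN, hdrop, htake, hw0, hcur, if_pos hA]
    by_cases hv : v < 2
    · by_cases hi0 : i = 0
      · simp [hi0, hv]
      · have hp := hprev hi0
        rw [List.getD_eq_getElem?_getD] at hp
        simp [hi0, hv, hp]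
    · simp [hv]
  · rw [if_neg hA]
    by_cases hC : k ≤ i
    · -- window fully inside rest
      rw [if_pos hC]
      obtain ⟨j, rfl⟩ : ∃ j, i = k + j := ⟨i - k, by omega⟩
      have hdrop : (List.replicate k v ++ rest).drop (k + j) = rest.drop j := by
        rw [show k + j = (List.replicate k v).length + j by simp]
        exact List.drop_length_add_append j
      have hcond : ((k + j = 0) ∨ (List.replicate k v ++ rest).getD (k + j - 1) 0
              ≠ (List.replicate k v ++ rest).getD (k + j) 0)
          ↔ ((j = 0) ∨ rest.getD (j - 1) 0 ≠ rest.getD j 0) := by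
        by_cases hj : j = 0
        · subst hj
          obtain ⟨h, t, rfl⟩ : ∃ h t, rest = h :: t := by
            cases rest with
            | nil => simp at hi; omega
            | cons h t => exact ⟨h, t, rfl⟩
          have e1 : (List.replicate k v ++ h :: t).getD (k + 0 - 1) 0 = v :=
            getD_rappend_left k v (h :: t) (k + 0 - 1) 0 (by omega)
          have e2 : (List.replicate k v ++ h :: t).getD (k + 0) 0 = (h :: t).getD 0 0 :=
            getD_rappend_right k v (h :: t) 0 0
          rw [e1, e2]
          have : h ≠ v := hh h (by simp)
          simp [this.symm]
        · have e1 : (List.replicate k v ++ rest).getD (k + j - 1) 0 = rest.getD (j - 1) 0 := by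
            rw [show k + j - 1 = k + (j - 1) by omega]
            exact getD_rappend_right k v rest (j-1) 0
          have e2 : (List.replicate k v ++ rest).getD (k + j) 0 = rest.getD j 0 :=
            getD_rappend_right k v rest j 0
          rw [e1, e2]
          constructor
          · rintro (h0 | hne)
            · omega
            · exact Or.inr hne
          · rintro (h0 | hne)
            · omega
            · exact Or.inr hne
      simp only [pvWsN, hdrop, show k + j - k = j by omega]
      by_cases hq : ((rest.drop j).take 5).getD 0 0 < 2 ∧
          ((rest.drop j).take 5).count (((rest.drop j).take 5).getD 0 0) = 5
      · rw [if_pos hq, if_pos hq]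
        by_cases hc2 : (j = 0) ∨ rest.getD (j - 1) 0 ≠ rest.getD j 0
        · rw [if_pos (hcond.mpr hc2), if_pos hc2]
        · rw [if_neg (fun h => hc2 (hcond.mp h)), if_neg hc2]
      · rw [if_neg hq, if_neg hq]
    · -- window straddles the run boundary: it is not uniform
      rw [if_neg hC]
      have hik : i < k := by omega
      have hdrop : (List.replicate k v ++ rest).drop i = List.replicate (k - i) v ++ rest := by
        rw [List.drop_append_of_le_length (by simp; omega), List.drop_replicate]
      obtain ⟨h, t, rfl⟩ : ∃ h t, rest = h :: t := by
        cases rest with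
        | nil => simp at hi; omega
        | cons h t => exact ⟨h, t, rfl⟩
      have hne : h ≠ v := hh h (by simp)
      set w := ((List.replicate k v ++ h :: t).drop i).take 5 with hw
      have hw0 : w.getD 0 0 = v := by
        rw [hw, hdrop]
        rw [List.getD_eq_getElem?_getD, List.getElem?_take_of_lt (by omega),
            List.getElem?_append_left (by simp; omega)]
        simp [show 0 < k - i by omega]
      have hgetw : w[k - i]? = some h := by
        rw [hw, hdrop, List.getElem?_take_of_lt (by omega),
            show (k - i : Nat) = (List.replicate (k-i) v).length + 0 by simp,
            List.getElem?_append_right (by simp)]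
        simp
      have hmem : h ∈ w := List.mem_of_getElem? hgetw
      have hwlen : w.length = 5 := by
        rw [hw]
        simp [List.length_take, List.length_drop] at hlen5 ⊢
        omega
      simp only [pvWsN, ← hw, hw0]
      rw [if_neg]
      rintro ⟨-, hcnt⟩
      rw [← hwlen] at hcnt
      have := (List.count_eq_length.mp hcnt) h hmem
      exact hne this.symm

-- the boundary-weighted window count of a single run: 3 + (K-1) extra windows
lemma sum_start3 (K : Nat) :
    ((List.range K).map (fun i => if i = 0 then (3:Int) else 1)).sum
      = if K = 0 then 0 else (K : Int) + 2 := by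
  induction K with
  | zero => simp
  | succ n ih =>
    rw [List.range_succ, List.map_append, List.sum_append, ih]
    rcases Nat.eq_zero_or_pos n with h | h
    · simp [h]
    · have hn : n ≠ 0 := by omega
      simp [hn]
      omega

-- B's window sum of a leading run followed by a differing rest
lemma sum_range_split (f : Nat → Int) (a b : Nat) :
    ((List.range (a+b)).map f).sum
      = ((List.range a).map f).sum + ((List.range b).map (fun j => f (a+j))).sum := by
  rw [List.range_add, List.map_append, List.sum_append, List.map_map]
  rfl

lemma pvWS_rappend (k : Nat) (v : Int) (rest : List Int) (hk : 1 ≤ k)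
    (hh : ∀ h ∈ rest.head?, h ≠ v) :
    pvWS (List.replicate k v ++ rest) = pvGp (v, (k:Int)) + pvWS rest := by
  have hlen : (List.replicate k v ++ rest).length - 4 = k + rest.length - 4 := by simp
  have hcong : ((List.range (k + rest.length - 4)).map
        (pvWsN (List.replicate k v ++ rest))).sum
      = ((List.range (k + rest.length - 4)).map (fun i =>
          if i + 4 < k then (if v < 2 then (if i = 0 then 3 else 1) else 0)
          else if k ≤ i then pvWsN rest (i - k) else 0)).sum := by
    congr 1
    apply List.map_congr_left
    intro i hi
    rw [List.mem_range] at hi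
    exact pvWsN_rappend k v rest hk hh i hi
  set g : Nat → Int := fun i =>
      if i + 4 < k then (if v < 2 then (if i = 0 then 3 else 1) else 0)
      else if k ≤ i then pvWsN rest (i - k) else 0 with hg
  set N := k + rest.length - 4 with hN
  set P := min k N with hP
  have hNeq : N = (k-4) + ((P-(k-4)) + (N-P)) := by omega
  have hsum : ((List.range N).map g).sum
      = ((List.range (k-4)).map g).sum
        + (((List.range (P-(k-4))).map (fun j => g ((k-4)+j))).sum
           + ((List.range (N-P)).map (fun j => g ((k-4)+((P-(k-4))+j)))).sum) := by
    rw [hNeq, sum_range_split]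
    congr 1
    rw [sum_range_split]
    have he : k - 4 + (P - (k - 4) + (N - P)) - P = N - P := by omega
    rw [he]
  have hpiece1 : ((List.range (k-4)).map g).sum = pvGp (v, (k:Int)) := by
    by_cases hv : v < 2
    · have h : ((List.range (k-4)).map g).sum
          = ((List.range (k-4)).map (fun i => if i = 0 then (3:Int) else 1)).sum := by
        congr 1
        apply List.map_congr_left
        intro i hi
        rw [List.mem_range] at hi
        simp only [hg]
        rw [if_pos (by omega), if_pos hv]
      rw [h, sum_start3]
      simp only [pvGp]
      by_cases h5 : k - 4 = 0
      · rw [if_pos h5, if_neg]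
        rintro ⟨-, h52⟩
        omega
      · rw [if_neg h5, if_pos ⟨hv, by omega⟩]
        omega
    · have h : ((List.range (k-4)).map g).sum = 0 := by
        apply List.sum_eq_zero
        intro x hx
        obtain ⟨i, hi, rfl⟩ := List.mem_map.mp hx
        rw [List.mem_range] at hi
        simp only [hg]
        rw [if_pos (by omega), if_neg hv]
      rw [h, pvGp, if_neg]
      rintro ⟨hv2, -⟩
      exact hv hv2
  have hpiece2 : ((List.range (P-(k-4))).map (fun j => g ((k-4)+j))).sum = 0 := by
    apply List.sum_eq_zero
    intro x hx
    obtain ⟨j, hj, rfl⟩ := List.mem_map.mp hx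
    rw [List.mem_range] at hj
    simp only [hg]
    rw [if_neg (by omega), if_neg (by omega)]
  have hpiece3 : ((List.range (N-P)).map (fun j => g ((k-4)+((P-(k-4))+j)))).sum
      = pvWS rest := by
    by_cases hsmall : N ≤ k
    · have h0 : N - P = 0 := by omega
      have h1 : rest.length - 4 = 0 := by omega
      simp [h0, pvWS, h1]
    · have hPk : P = k := by omega
      have hNP : N - P = rest.length - 4 := by omega
      rw [pvWS]
      rw [hNP]
      congr 1
      apply List.map_congr_left
      intro j hj
      rw [List.mem_range] at hj
      simp only [hg]
      rw [if_neg (by omega), if_pos (by omega)]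
      congr 1
      omega
  conv_lhs => rw [pvWS]
  rw [hlen, hcong, hsum, hpiece1, hpiece2, hpiece3]
  omega

-- the groups of a leading run followed by a differing rest
lemma runsFrom_rappend (v : Int) (rest : List Int) : ∀ (j : Nat) (r : Int),
    pvRunsFrom v r (List.replicate j v ++ rest) = pvRunsFrom v (r + j) rest := by
  intro j
  induction j with
  | zero => intro r; simp
  | succ n ih =>
    intro r
    simp only [List.replicate_succ, List.cons_append, pvRunsFrom, ih]
    have he : r + 1 + (n:Int) = r + ((n+1:Nat):Int) := by omega
    rw [he, if_pos trivial]

lemma groups_rappend (k : Nat) (v : Int) (rest : List Int) (hk : 1 ≤ k)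
    (hh : ∀ h ∈ rest.head?, h ≠ v) :
    pvGroups (List.replicate k v ++ rest) = (v, (k:Int)) :: pvGroups rest := by
  obtain ⟨k', rfl⟩ : ∃ k', k = k' + 1 := ⟨k - 1, by omega⟩
  simp only [List.replicate_succ, List.cons_append, pvGroups, runsFrom_rappend]
  have h1 : (1 : Int) + (k' : Int) = ((k' + 1 : Nat) : Int) := by omega
  rw [h1]
  cases rest with
  | nil => simp [pvRunsFrom]
  | cons h t =>
    have : h ≠ v := hh h (by simp)
    simp [pvRunsFrom, this]

lemma pvWS_eq_line : ∀ (n : Nat) (l : List Int), l.length ≤ n → pvWS l = pvLine l := by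
  intro n
  induction n with
  | zero =>
    intro l hl
    have : l = [] := List.eq_nil_of_length_eq_zero (by omega)
    subst this
    simp [pvWS, pvLine, pvGroups]
  | succ n ih =>
    intro l hl
    cases hL : l with
    | nil => simp [pvWS, pvLine, pvGroups]
    | cons v t =>
      subst hL
      set tw := (v :: t).takeWhile (fun x => x == v) with htw_def
      set dw := (v :: t).dropWhile (fun x => x == v) with hdw_def
      have htw : tw = List.replicate tw.length v := by
        apply List.eq_replicate_of_mem
        intro b hb
        have := List.mem_takeWhile_imp hb
        simpa using this
      have hk : 1 ≤ tw.length := by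
        have hcons : tw = v :: t.takeWhile (fun x => x == v) := by
          rw [htw_def, List.takeWhile_cons]
          simp
        simp [hcons]
      have hsplit : tw ++ dw = v :: t := List.takeWhile_append_dropWhile
      have hh : ∀ h ∈ dw.head?, h ≠ v := by
        intro h hmem
        have hpf := head?_dropWhile_false (fun x => x == v) (v :: t) h (by simpa [hdw_def] using hmem)
        simpa using hpf
      have hlen : tw.length + dw.length = t.length + 1 := by
        have := congrArg List.length hsplit
        simpa using this
      have hdwlen : dw.length ≤ n := by
        simp at hl
        omega
      calc pvWS (v :: t) = pvWS (List.replicate tw.length v ++ dw) := by rw [← hsplit, ← htw]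
        _ = pvGp (v, (tw.length : Int)) + pvWS dw := pvWS_rappend _ _ _ hk hh
        _ = pvGp (v, (tw.length : Int)) + pvLine dw := by rw [ih dw hdwlen]
        _ = pvLine (List.replicate tw.length v ++ dw) := by
              simp only [pvLine]
              rw [groups_rappend _ _ _ hk hh, List.map_cons, List.sum_cons]
        _ = pvLine (v :: t) := by rw [← hsplit, ← htw]

-- B's ported window scorer computes the groups penalty
lemma windowScore_eq_line (l : List Int) : pvWindowScore l = pvLine l := by
  have hws : pvWindowScore l = pvWS l := by
    simp only [pvWindowScore]
    rw [PySem.List.foldl_congr_mem _ _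
        (fun tot i => tot +
          (if PySem.List.pyGetD (PySem.List.slice l (some i) (some (i+5))) 0 0 < 2 ∧
              PySem.List.count (PySem.List.slice l (some i) (some (i+5)))
                (PySem.List.pyGetD (PySem.List.slice l (some i) (some (i+5))) 0 0) = 5 then
            (if i = 0 ∨ PySem.List.pyGetD l (i - 1) 0 ≠ PySem.List.pyGetD l i 0 then (3:Int) else 1)
          else 0)) 0
        (by intro acc x _; dsimp only; split_ifs <;> omega)]
    rw [PySem.List.foldl_add]
    rw [PySem.List.pyRange_one, List.map_map]
    have ht : ((l.length : Int) - 4 - 0).toNat = l.length - 4 := by omega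
    rw [ht, pvWS]
    rw [zero_add]
    congr 1
    apply List.map_congr_left
    intro k hk
    rw [List.mem_range] at hk
    have hk0 : (0:Int) + (k:Int) = (k:Int) := by omega
    have e1 : ((k:Int)+5).toNat - ((k:Int)).toNat = 5 := by omega
    have e2 : ((k:Int)).toNat = k := by omega
    have hslice : PySem.List.slice l (some (k:Int)) (some ((k:Int)+5)) = (l.drop k).take 5 := by
      rw [PySem.List.slice_toNat l (by omega) (by omega), e1, e2]
    simp only [Function.comp_def, hk0, hslice, PySem.List.pyGetD_ofNat', PySem.List.count_eq,
      pvWsN]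
    by_cases hkz : k = 0
    · subst hkz
      norm_num
    · have hne : (k:Int) ≠ 0 := by exact_mod_cast hkz
      have hm1 : (k:Int) - 1 = ((k-1:Nat):Int) := by omega
      rw [hm1, PySem.List.pyGetD_natCast, PySem.List.pyGetD_natCast]
      simp [hkz]
  rw [hws]
  exact pvWS_eq_line l.length l le_rfl

-- values read by range-indexing through [4, b) form exactly the slice [4:b]
lemma map_getD_range_slice {α : Type} (xs : List α) (d : α) (b : Int)
    (h4 : 4 ≤ b) (hb : b ≤ (xs.length : Int)) :
    (PySem.List.pyRange 4 b 1).map (fun i => PySem.List.pyGetD xs i d)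
      = PySem.List.slice xs (some 4) (some b) := by
  set t := xs.take b.toNat with ht
  have hlen : ((t).length : Int) = b := by simp [ht, List.length_take]; omega
  have hmap : (PySem.List.pyRange 4 b 1).map (fun i => PySem.List.pyGetD xs i d)
      = (PySem.List.pyRange 4 b 1).map (fun i => PySem.List.pyGetD t i d) := by
    apply List.map_congr_left
    intro i hi
    rw [PySem.List.mem_pyRange_one] at hi
    rw [PySem.List.pyGetD_eq_getElem xs d (by omega : 0 ≤ i) (by omega),
        PySem.List.pyGetD_eq_getElem t d (by omega : 0 ≤ i) (by rw [← hlen] at hi; omega)]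
    simp [ht, List.getElem_take]
  have hdrop : (PySem.List.pyRange 4 b 1).map (fun i => PySem.List.pyGetD t i d)
      = t.drop 4 := by
    conv_lhs => rw [← hlen]
    exact PySem.List.map_pyGetD_pyRange' t d (by norm_num : (0:Int) ≤ 4)
  rw [hmap, hdrop, PySem.List.slice_toNat xs (by norm_num) (by omega), ht, List.drop_take]
  simp

-- foldl that adds a per-element score is the sum of scores
lemma foldl_eq_sum_of_mem {α : Type} (L : List α) (g : Int → α → Int) (h : α → Int) :
    (∀ x ∈ L, ∀ pen, g pen x = pen + h x) →
    ∀ init : Int, L.foldl g init = init + (L.map h).sum := by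
  induction L with
  | nil => intro _ init; simp
  | cons a t ih =>
    intro H init
    simp only [List.foldl_cons, List.map_cons, List.sum_cons]
    rw [H a (by simp), ih (fun x hx => H x (by simp [hx]))]
    omega

-- A's horizontal pass over the active region sums the per-row line penalties
lemma horiz_sum (masked : List (List Int)) (b : Int) (hb4 : 4 ≤ b)
    (h1 : b ≤ (masked.length : Int))
    (h2 : ∀ r ∈ PySem.List.slice masked (some 4) (some b), b ≤ (r.length : Int)) :
    ∀ init : Int,
      (PySem.List.pyRange 4 b 1).foldl (fun pen row =>
        ((PySem.List.pyRange 4 b 1).foldl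
          (fun s col => pvStep s (PySem.List.pyGetD (PySem.List.pyGetD masked row []) col 0))
          (pen, 0, PySem.List.pyGetD (PySem.List.pyGetD masked row []) 4 0)).1) init
      = init + (((PySem.List.slice masked (some 4) (some b)).map
          (fun r => PySem.List.slice r (some 4) (some b))).map pvLine).sum := by
  intro init
  have hrows := map_getD_range_slice masked [] b hb4 h1
  have step1 : (PySem.List.pyRange 4 b 1).foldl (fun pen row =>
        ((PySem.List.pyRange 4 b 1).foldl
          (fun s col => pvStep s (PySem.List.pyGetD (PySem.List.pyGetD masked row []) col 0))
          (pen, 0, PySem.List.pyGetD (PySem.List.pyGetD masked row []) 4 0)).1) init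
      = (PySem.List.slice masked (some 4) (some b)).foldl (fun pen rl =>
        ((PySem.List.pyRange 4 b 1).foldl
          (fun s col => pvStep s (PySem.List.pyGetD rl col 0))
          (pen, 0, PySem.List.pyGetD rl 4 0)).1) init := by
    rw [← hrows, List.foldl_map]
  rw [step1]
  rw [foldl_eq_sum_of_mem _ _ (fun rl => pvLine (PySem.List.slice rl (some 4) (some b))) ?_ init]
  · simp only [List.map_map, Function.comp_def]
  · intro rl hrl pen
    have hinner : (PySem.List.pyRange 4 b 1).foldl
          (fun s col => pvStep s (PySem.List.pyGetD rl col 0))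
          (pen, 0, PySem.List.pyGetD rl 4 0)
        = (PySem.List.slice rl (some 4) (some b)).foldl pvStep
            (pen, 0, PySem.List.pyGetD rl 4 0) := by
      rw [← map_getD_range_slice rl 0 b hb4 (h2 rl hrl), List.foldl_map]
    rw [hinner, scan_line]

-- A's vertical scan of column `col` is the line penalty of that column of the region
lemma vert_inner (masked : List (List Int)) (b col : Int) (hb4 : 4 ≤ b)
    (h1 : b ≤ (masked.length : Int))
    (h2 : ∀ r ∈ PySem.List.slice masked (some 4) (some b), b ≤ (r.length : Int))
    (hc : 4 ≤ col ∧ col < b) (pen c0 : Int) :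
    ((PySem.List.pyRange 4 b 1).foldl
        (fun s row => pvStep s (PySem.List.pyGetD (PySem.List.pyGetD masked row []) col 0))
        (pen, 0, c0)).1
      = pen + pvLine (((PySem.List.slice masked (some 4) (some b)).map
          (fun r => PySem.List.slice r (some 4) (some b))).map
            (fun lr => lr.getD (col.toNat - 4) 0)) := by
  have hrows := map_getD_range_slice masked [] b hb4 h1
  have step1 : (PySem.List.pyRange 4 b 1).foldl
        (fun s row => pvStep s (PySem.List.pyGetD (PySem.List.pyGetD masked row []) col 0))
        (pen, 0, c0)
      = (PySem.List.slice masked (some 4) (some b)).foldl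
          (fun s rl => pvStep s (PySem.List.pyGetD rl col 0)) (pen, 0, c0) := by
    rw [← hrows, List.foldl_map]
  have step2 : (PySem.List.slice masked (some 4) (some b)).foldl
          (fun s rl => pvStep s (PySem.List.pyGetD rl col 0)) (pen, 0, c0)
      = ((PySem.List.slice masked (some 4) (some b)).map
          (fun rl => PySem.List.pyGetD rl col 0)).foldl pvStep (pen, 0, c0) := by
    rw [List.foldl_map]
  have hcolumn : (PySem.List.slice masked (some 4) (some b)).map
          (fun rl => PySem.List.pyGetD rl col 0)
      = ((PySem.List.slice masked (some 4) (some b)).map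
          (fun r => PySem.List.slice r (some 4) (some b))).map
            (fun lr => lr.getD (col.toNat - 4) 0) := by
    rw [List.map_map]
    apply List.map_congr_left
    intro rl hrl
    have hr := h2 rl hrl
    rw [PySem.List.pyGetD_eq_getElem rl 0 (by omega) (by omega)]
    show _ = (PySem.List.slice rl (some 4) (some b)).getD (col.toNat - 4) 0
    rw [PySem.List.slice_toNat rl (by norm_num) (by omega)]
    rw [List.getD_eq_getElem _ 0 (by simp [List.length_take, List.length_drop]; omega)]
    simp only [List.getElem_take, List.getElem_drop]
    congr 1
    omega
  rw [step1, step2, hcolumn, scan_line]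

-- ===== VERDICT (by name: the statement is the Claim_ definition above) =====
theorem rule1_penalty_spec : Claim_equal_rule1_penalty := by
  intro masked size _ hpre
  unfold Spec_rule1_penalty
  by_cases hsz : 9 ≤ size
  · obtain ⟨h1, h2, h3⟩ := hpre hsz
    have hb4 : (4:Int) ≤ size - 4 := by omega
    simp only [rule1_penalty, rule1_penalty_alt, if_neg (show ¬ size - 4 ≤ 4 by omega)]
    rw [horiz_sum masked (size - 4) hb4 h1 h2 0]
    rw [foldl_eq_sum_of_mem _ _
        (fun col => pvLine (((PySem.List.slice masked (some 4) (some (size - 4))).map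
          (fun r => PySem.List.slice r (some 4) (some (size - 4)))).map
            (fun lr => lr.getD (col.toNat - 4) 0)))
        (fun col hcol pen => by
          rw [PySem.List.mem_pyRange_one] at hcol
          exact vert_inner masked (size - 4) col hb4 h1 h2 hcol pen _)]
    rw [PySem.List.foldl_add, PySem.List.foldl_add]
    have hrowB : List.map pvWindowScore
          (List.map (fun r => PySem.List.slice r (some 4) (some (size - 4)))
            (PySem.List.slice masked (some 4) (some (size - 4))))
        = List.map (pvLine ∘ fun r => PySem.List.slice r (some 4) (some (size - 4)))
            (PySem.List.slice masked (some 4) (some (size - 4))) := by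
      rw [List.map_map]
      apply List.map_congr_left
      intro r _
      simp [windowScore_eq_line]
    rw [hrowB, List.map_map]
    congr 1
    rw [PySem.List.pyRange_one 4 (size - 4), PySem.List.pyRange_one 0 (size - 4 - 4),
      List.map_map, List.map_map]
    have htn : (size - 4 - 4 - 0) = size - 4 - 4 := by omega
    rw [htn]
    apply congrArg
    apply List.map_congr_left
    intro k hk
    simp only [Function.comp_def]
    rw [windowScore_eq_line]
    have e1 : ((4:Int) + (k:Int)).toNat - 4 = k := by omega
    have e2 : (0:Int) + (k:Int) = (k:Int) := by omega
    rw [e1, e2]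
    congr 1
    apply List.map_congr_left
    intro row _
    rw [PySem.List.pyGetD_natCast]
  · have hb : size - 4 ≤ 4 := by omega
    unfold rule1_penalty rule1_penalty_alt
    rw [PySem.List.pyRange_one_eq_nil hb, if_pos hb]
    simp
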